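-- pv_equiv track=rewrite | github.com/ook-lab/document-management-system | scripts/debug/classify_app.py | _majority_verdict
-- ===== SOURCE A (Python) =====
-- def _majority_verdict(page_verdicts: list[str]) -> str:
--     """過半数の種別をドキュメント種別とする"""
--     if not page_verdicts:
--         return 'UNKNOWN'
--     counts: dict[str, int] = {}
--     for v in page_verdicts:
--         counts[v] = counts.get(v, 0) + 1
--     # 種類が複数 → MIXED
--     unique = set(page_verdicts)
--     if len(unique) > 1:
--         return 'MIXED'
--     return page_verdicts[0]
-- ===== SOURCE B (Python) =====
-- def _majority_verdict(page_verdicts: list[str]) -> str: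
--     """過半数の種別をドキュメント種別とする"""
--     if not page_verdicts:
--         return 'UNKNOWN'
--     first = page_verdicts[0]
--     for v in page_verdicts:
--         if v != first:
--             return 'MIXED'
--     return first
-- ===== Notes on version B (the rewrite author's own statement) =====
-- stated objective: simpler
-- what changed: Replaces A's counts dict plus set materialization with a single short-circuiting scan comparing each verdict to the first element; nothing auxiliary is maintained.
import Mathlib
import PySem

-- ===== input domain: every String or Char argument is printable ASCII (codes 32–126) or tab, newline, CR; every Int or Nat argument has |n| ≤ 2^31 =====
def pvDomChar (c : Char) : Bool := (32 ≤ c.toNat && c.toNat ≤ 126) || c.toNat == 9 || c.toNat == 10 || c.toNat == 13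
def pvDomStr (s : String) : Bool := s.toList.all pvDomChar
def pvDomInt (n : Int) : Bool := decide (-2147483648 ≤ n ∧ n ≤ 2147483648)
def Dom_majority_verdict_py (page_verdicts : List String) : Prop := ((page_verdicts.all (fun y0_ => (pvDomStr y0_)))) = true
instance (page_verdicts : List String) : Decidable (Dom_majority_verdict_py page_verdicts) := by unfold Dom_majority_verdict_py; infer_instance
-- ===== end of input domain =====

-- B replaces A's counts-dict-plus-set with a single short-circuiting scan against the first
-- element (objective: simpler); same return value on every input.

-- ===== PORT A =====
def majority_verdict_py (page_verdicts : List String) : String :=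
  if page_verdicts = [] then "UNKNOWN"
  else
    -- counts: dict built by the loop (unused by the return value, kept as in A)
    let _counts : PySem.Dict String Int :=
      page_verdicts.foldl (fun d v => d.insert v (d.getD v 0 + 1)) PySem.Dict.empty
    let unique : PySem.Set String := PySem.Set.ofList page_verdicts
    if PySem.Set.len unique > 1 then "MIXED"
    else PySem.List.pyGetD page_verdicts 0 ""

-- ===== PORT B =====
-- the 'for v in page_verdicts: if v != first: return MIXED' loop
def mvScan (first : String) : List String → String
  | [] => first
  | v :: rest => if v ≠ first then "MIXED" else mvScan first rest

def majority_verdict_py_alt (page_verdicts : List String) : String :=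
  match page_verdicts with
  | [] => "UNKNOWN"
  | first :: _ => mvScan first page_verdicts

-- ===== PRECONDITION & SPEC =====
def Spec_majority_verdict_py (page_verdicts : List String) (out : String) : Prop := out = majority_verdict_py_alt page_verdicts
instance (page_verdicts : List String) (out : String) : Decidable (Spec_majority_verdict_py page_verdicts out) := by unfold Spec_majority_verdict_py; infer_instance

-- ===== CLAIM (what is proved, stated in full; the proofs are below) =====
def Claim_equal_majority_verdict_py : Prop := ∀ (page_verdicts : List String), Dom_majority_verdict_py page_verdicts → Spec_majority_verdict_py page_verdicts (majority_verdict_py page_verdicts)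

-- ===== LEMMAS AND PROOFS =====

lemma mvScan_all (first : String) (t : List String) (hall : ∀ v ∈ t, v = first) :
    mvScan first t = first := by
  induction t with
  | nil => rfl
  | cons v rest ih =>
    have hv : v = first := hall v (by simp)
    simp [mvScan, hv]
    exact ih (fun w hw => hall w (by simp [hw]))

lemma mvScan_mixed (first : String) (t : List String) (hex : ∃ v ∈ t, v ≠ first) :
    mvScan first t = "MIXED" := by
  induction t with
  | nil => simp at hex
  | cons v rest ih =>
    by_cases hv : v = first
    · simp [mvScan, hv]
      rcases hex with ⟨w, hw, hwne⟩
      rcases List.mem_cons.mp hw with h | h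
      · exact absurd (h ▸ hwne) (by simp [hv])
      · exact ih ⟨w, h, hwne⟩
    · simp [mvScan, hv]

lemma nodup_all_eq (first : String) (l : List String) (hn : l.Nodup)
    (hm : first ∈ l) (hall : ∀ x ∈ l, x = first) : l = [first] := by
  cases l with
  | nil => simp at hm
  | cons x xs =>
    have hx : x = first := hall x (by simp)
    have : xs = [] := by
      cases xs with
      | nil => rfl
      | cons y ys =>
        have hy : y = first := hall y (by simp)
        simp [hx, hy] at hn
    simp [hx, this]

lemma ofList_len_gt_one (first : String) (t : List String) (hex : ∃ v ∈ t, v ≠ first) :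
    PySem.Set.len (PySem.Set.ofList (first :: t)) > 1 := by
  rcases hex with ⟨v, hv, hvne⟩
  have hn : (PySem.Set.ofList (first :: t)).Nodup := PySem.Set.nodup_ofList _
  have h1 : first ∈ PySem.Set.ofList (first :: t) := by
    rw [PySem.Set.mem_ofList]; simp
  have h2 : v ∈ PySem.Set.ofList (first :: t) := by
    rw [PySem.Set.mem_ofList]; simp [hv]
  have hcard : (PySem.Set.ofList (first :: t)).toFinset.card =
      (PySem.Set.ofList (first :: t)).length := List.toFinset_card_of_nodup hn
  have : 1 < (PySem.Set.ofList (first :: t)).toFinset.card := by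
    rw [Finset.one_lt_card]
    exact ⟨first, List.mem_toFinset.mpr h1, v, List.mem_toFinset.mpr h2, fun h => hvne h.symm⟩
  simpa [PySem.Set.len, hcard] using this

-- ===== VERDICT (by name: the statement is the Claim_ definition above) =====
theorem majority_verdict_py_spec : Claim_equal_majority_verdict_py := by
  intro pvs _
  unfold Spec_majority_verdict_py majority_verdict_py majority_verdict_py_alt
  cases pvs with
  | nil => rfl
  | cons first t =>
    simp only [reduceCtorEq, if_false]
    by_cases hall : ∀ v ∈ t, v = first
    · have hset : PySem.Set.ofList (first :: t) = [first] := by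
        apply nodup_all_eq first _ (PySem.Set.nodup_ofList _)
        · rw [PySem.Set.mem_ofList]; simp
        · intro x hx
          rw [PySem.Set.mem_ofList] at hx
          rcases List.mem_cons.mp hx with h | h
          · exact h
          · exact hall x h
      have hlen : ¬ PySem.Set.len (PySem.Set.ofList (first :: t)) > 1 := by
        simp [hset, PySem.Set.len]
      rw [if_neg hlen]
      have : mvScan first (first :: t) = first := by
        apply mvScan_all
        intro v hv
        rcases List.mem_cons.mp hv with h | h
        · exact h
        · exact hall v h
      rw [this]
      simp [PySem.List.pyGetD, PySem.List.pyGet?, PySem.List.pyIdx?]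
    · push Not at hall
      rw [if_pos (ofList_len_gt_one first t hall)]
      have : mvScan first (first :: t) = "MIXED" := by
        apply mvScan_mixed
        rcases hall with ⟨v, hv, hvne⟩
        exact ⟨v, by simp [hv], hvne⟩
      rw [this]
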